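-- pv_equiv track=rewrite | github.com/jfmatheusg/magneto | magneto-app/mutant/app.py | checkDna
-- ===== SOURCE A (Python) =====
-- def checkDna(dnaStrip):
--     mutantChains = ["AAAA","CCCC","GGGG","TTTT"]
--     mutationsCount=0
--     for mutantChain in mutantChains:
--         if mutantChain in dnaStrip:
--             mutationsCount+=dnaStrip.count(mutantChain)
--             if mutationsCount>1:
--                 break
--
--     return mutationsCount
-- ===== SOURCE B (Python) =====
-- def checkDna(dnaStrip):
--     counts = {}
--     cur = None
--     run = 0
--     for ch in dnaStrip:
--         if ch == cur:
--             run += 1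
--         else:
--             if cur is not None:
--                 counts[cur] = counts.get(cur, 0) + run // 4
--             cur = ch
--             run = 1
--     if cur is not None:
--         counts[cur] = counts.get(cur, 0) + run // 4
--     mutationsCount = 0
--     for ch in "ACGT":
--         c = counts.get(ch, 0)
--         if c > 0:
--             mutationsCount += c
--             if mutationsCount > 1:
--                 break
--     return mutationsCount
-- ===== Notes on version B (the rewrite author's own statement) =====
-- stated objective: alternative
-- what changed: Replaced A's four separate substring scans (membership test plus .count per homopolymer pattern) by a single left-to-right run-length pass that adds run//4 to a per-character dict whenever a run ends, followed by the same fixed-order pattern accumulation with the >1 early break.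
import Mathlib
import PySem

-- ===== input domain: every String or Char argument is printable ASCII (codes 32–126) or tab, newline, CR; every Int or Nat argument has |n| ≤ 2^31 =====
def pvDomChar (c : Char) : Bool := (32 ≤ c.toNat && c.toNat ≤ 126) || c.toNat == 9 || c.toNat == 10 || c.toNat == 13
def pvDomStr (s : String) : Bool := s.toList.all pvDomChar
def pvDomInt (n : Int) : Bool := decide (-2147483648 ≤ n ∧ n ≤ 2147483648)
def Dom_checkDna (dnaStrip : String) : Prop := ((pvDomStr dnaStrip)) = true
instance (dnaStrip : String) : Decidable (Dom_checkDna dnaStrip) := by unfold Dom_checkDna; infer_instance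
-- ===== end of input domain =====

-- B replaces A's four separate substring scans (`in` + `.count` per pattern) by one
-- run-length pass that tallies run//4 per character into a dict; same return value,
-- an alternative single-traversal decomposition (not measured faster in CPython).

-- ===== PORT A =====
-- the for-loop over mutantChains with its early `break`
def pvALoop (s : String) : List String → Int → Int
  | [], m => m
  | chain :: rest, m =>
    if PySem.Str.isIn chain s then
      let m' := m + (PySem.Str.count s chain : Int)
      if m' > 1 then m' else pvALoop s rest m'
    else pvALoop s rest m

def checkDna (dnaStrip : String) : Int :=
  pvALoop dnaStrip ["AAAA", "CCCC", "GGGG", "TTTT"] 0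

-- ===== PORT B =====
-- one pass building counts[char] += run//4 at each run end, then the ACGT loop
def pvBStep (st : PySem.Dict Char Int × Option Char × Int) (ch : Char) :
    PySem.Dict Char Int × Option Char × Int :=
  match st with
  | (d, cur, run) =>
    if some ch == cur then (d, cur, run + 1)
    else
      let d' := match cur with
        | some c => d.insert c (d.getD c 0 + PySem.Int.floordiv run 4)
        | none => d
      (d', some ch, 1)

def pvBFlush (st : PySem.Dict Char Int × Option Char × Int) : PySem.Dict Char Int :=
  match st with
  | (d, some c, run) => d.insert c (d.getD c 0 + PySem.Int.floordiv run 4)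
  | (d, none, _) => d

def pvBLoop (d : PySem.Dict Char Int) : List Char → Int → Int
  | [], m => m
  | ch :: rest, m =>
    let cnt := d.getD ch 0
    if cnt > 0 then
      let m' := m + cnt
      if m' > 1 then m' else pvBLoop d rest m'
    else pvBLoop d rest m

def checkDna_alt (dnaStrip : String) : Int :=
  let st := dnaStrip.toList.foldl pvBStep (PySem.Dict.empty, none, 0)
  pvBLoop (pvBFlush st) ['A', 'C', 'G', 'T'] 0

-- ===== PRECONDITION & SPEC =====
def Spec_checkDna (dnaStrip : String) (out : Int) : Prop := out = checkDna_alt dnaStrip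
instance (dnaStrip : String) (out : Int) : Decidable (Spec_checkDna dnaStrip out) := by unfold Spec_checkDna; infer_instance

-- ===== CLAIM (what is proved, stated in full; the proofs are below) =====
def Claim_equal_checkDna : Prop := ∀ (dnaStrip : String), Dom_checkDna dnaStrip → Spec_checkDna dnaStrip (checkDna dnaStrip)

-- ===== LEMMAS AND PROOFS =====

-- greedy non-overlapping count of the 4-char homopolymer [c,c,c,c], = Python str.count
def pvGreedy (c : Char) : List Char → Nat
  | [] => 0
  | h :: t =>
    if [c, c, c, c].isPrefixOf (h :: t) then pvGreedy c (t.drop 3) + 1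
    else pvGreedy c t
  termination_by l => l.length
  decreasing_by
  · simp
  · simp

lemma pv_go_eq (c : Char) : ∀ (fuel : Nat) (l : List Char) (acc : Nat), l.length ≤ fuel →
    PySem.Chars.count.go [c, c, c, c] fuel l acc = acc + pvGreedy c l := by
  intro fuel
  induction fuel with
  | zero =>
    intro l acc h
    have hl : l = [] := List.length_eq_zero_iff.mp (by omega)
    subst hl
    simp [PySem.Chars.count.go, pvGreedy]
  | succ n ih =>
    intro l acc h
    cases l with
    | nil => simp [PySem.Chars.count.go, pvGreedy]
    | cons x t =>
      rw [PySem.Chars.count.go]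
      rw [pvGreedy]
      by_cases hp : [c,c,c,c].isPrefixOf (x :: t) = true
      · simp only [hp, if_true]
        have hdrop : List.drop [c,c,c,c].length (x :: t) = t.drop 3 := by simp
        rw [hdrop, ih]
        · omega
        · simp at h ⊢; omega
      · simp only [Bool.not_eq_true] at hp
        simp only [hp, Bool.false_eq_true, if_false]
        rw [ih] ; simp at h; omega

lemma pv_count_eq (c : Char) (s : List Char) :
    PySem.Chars.count s [c, c, c, c] = pvGreedy c s := by
  rw [PySem.Chars.count]
  simp
  rw [pv_go_eq c s.length s 0 le_rfl]; omega

lemma pv_greedy_ne (c a : Char) (hca : c ≠ a) (k : Nat) (rest : List Char) :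
    pvGreedy c (List.replicate k a ++ rest) = pvGreedy c rest := by
  induction k with
  | zero => simp
  | succ n ih =>
    rw [List.replicate_succ, List.cons_append, pvGreedy]
    have : [c,c,c,c].isPrefixOf (a :: (List.replicate n a ++ rest)) = false := by
      simp [List.isPrefixOf, hca]
    simp only [this, Bool.false_eq_true, if_false]
    exact ih

lemma pv_not_prefix (a : Char) (k : Nat) (rest : List Char) (hk : k < 4)
    (h : rest.head? ≠ some a) :
    [a,a,a,a].isPrefixOf (List.replicate k a ++ rest) = false := by
  interval_cases k <;> cases rest <;> simp_all [List.isPrefixOf, List.replicate] <;> intro h' <;> simp_all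

lemma pv_greedy_eq (a : Char) (k : Nat) (rest : List Char) (h : rest.head? ≠ some a) :
    pvGreedy a (List.replicate k a ++ rest) = k / 4 + pvGreedy a rest := by
  induction k using Nat.strong_induction_on with
  | _ k ih =>
    by_cases h4 : 4 ≤ k
    · have hk : k = 4 + (k - 4) := by omega
      rw [hk, List.replicate_add, List.append_assoc]
      rw [show List.replicate 4 a = a :: List.replicate 3 a from rfl, List.cons_append, pvGreedy]
      have hp : [a,a,a,a].isPrefixOf (a :: (List.replicate 3 a ++ (List.replicate (k-4) a ++ rest))) = true := by
        simp [List.isPrefixOf, List.replicate]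
      simp only [hp, if_true]
      have hd : List.drop 3 (List.replicate 3 a ++ (List.replicate (k-4) a ++ rest))
          = List.replicate (k-4) a ++ rest := by
        simp
      rw [hd, ih (k - 4) (by omega)]
      omega
    · cases k with
      | zero => simp
      | succ n =>
        rw [List.replicate_succ, List.cons_append, pvGreedy]
        have := pv_not_prefix a (n+1) rest (by omega) h
        rw [List.replicate_succ, List.cons_append] at this
        simp only [this, Bool.false_eq_true, if_false]
        rw [ih n (by omega)]
        omega

lemma pv_greedy_pos_iff (c : Char) (l : List Char) :
    0 < pvGreedy c l ↔ [c,c,c,c] <:+: l := by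
  induction l using pvGreedy.induct c with
  | case1 => simp [pvGreedy]
  | case2 h t hp ih =>
    rw [pvGreedy]; simp only [hp, if_true]
    constructor
    · intro _; exact (List.isPrefixOf_iff_prefix.mp hp).isInfix
    · omega
  | case3 h t hp ih =>
    rw [pvGreedy]; simp only [hp, Bool.false_eq_true, if_false]
    rw [ih, List.infix_cons_iff]
    constructor
    · exact Or.inr
    · rintro (hpre | hinf)
      · exact absurd (List.isPrefixOf_iff_prefix.mpr hpre) (by simp [hp])
      · exact hinf

lemma pv_floordiv_nat (k : Nat) : PySem.Int.floordiv (k : Int) 4 = ((k / 4 : Nat) : Int) := by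
  rw [PySem.Int.floordiv_eq_ediv_of_pos (by omega)]
  exact Eq.symm (Nat.ToInt.div_congr rfl rfl)

lemma pv_flush_foldl (c : Char) : ∀ (l : List Char) (a : Char) (k : Nat) (d : PySem.Dict Char Int),
    (pvBFlush (l.foldl pvBStep (d, some a, (k : Int)))).getD c 0
      = d.getD c 0 + (pvGreedy c (List.replicate k a ++ l) : Int) := by
  intro l
  induction l with
  | nil =>
    intro a k d
    simp only [List.foldl_nil, List.append_nil, pvBFlush]
    rw [pv_floordiv_nat, PySem.Dict.getD_insert]
    by_cases hca : c = a
    · subst hca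
      rw [← List.append_nil (List.replicate k c), pv_greedy_eq c k [] (by simp)]
      simp [pvGreedy]
    · rw [if_neg hca, ← List.append_nil (List.replicate k a), pv_greedy_ne c a hca]
      simp [pvGreedy]
  | cons x t ih =>
    intro a k d
    rw [List.foldl_cons]
    by_cases hx : x = a
    · subst hx
      have hstep : pvBStep (d, some x, (k : Int)) x = (d, some x, ((k+1 : Nat) : Int)) := by
        simp [pvBStep]
      rw [hstep, ih x (k+1) d, List.replicate_succ', List.append_assoc]
      simp
    · have hstep : pvBStep (d, some a, (k : Int)) x
          = (d.insert a (d.getD a 0 + PySem.Int.floordiv (k : Int) 4), some x, ((1 : Nat) : Int)) := by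
        simp [pvBStep, hx]
      rw [hstep, ih x 1 _]
      rw [pv_floordiv_nat, PySem.Dict.getD_insert]
      have hrep1 : List.replicate 1 x ++ t = x :: t := by simp
      rw [hrep1]
      by_cases hca : c = a
      · subst hca
        rw [if_pos rfl, pv_greedy_eq c k (x :: t) (by simp [hx])]
        push_cast; ring
      · rw [if_neg hca, pv_greedy_ne c a hca]

lemma pv_alt_getD (c : Char) (s : List Char) :
    (pvBFlush (s.foldl pvBStep (PySem.Dict.empty, none, 0))).getD c 0 = (pvGreedy c s : Int) := by
  cases s with
  | nil => simp [pvBFlush, pvGreedy]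
  | cons x t =>
    rw [List.foldl_cons]
    have hstep : pvBStep (PySem.Dict.empty, none, 0) x
        = (PySem.Dict.empty, some x, ((1 : Nat) : Int)) := by simp [pvBStep]
    rw [hstep, pv_flush_foldl c t x 1 PySem.Dict.empty]
    simp

lemma pv_str_count (c : Char) (s : String) (sub : String) (hsub : sub.toList = [c,c,c,c]) :
    PySem.Str.count s sub = pvGreedy c s.toList := by
  rw [show PySem.Str.count s sub = PySem.Chars.count s.toList sub.toList from by simp, hsub,
    pv_count_eq]

lemma pv_str_isIn (c : Char) (s : String) (sub : String) (hsub : sub.toList = [c,c,c,c]) :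
    PySem.Str.isIn sub s = decide (0 < pvGreedy c s.toList) := by
  by_cases h : 0 < pvGreedy c s.toList
  · simp only [h, decide_true]
    rw [PySem.Str.isIn_iff_infix, hsub]
    exact (pv_greedy_pos_iff c s.toList).mp h
  · simp only [h, decide_false]
    rw [← Bool.not_eq_true, PySem.Str.isIn_iff_infix, hsub]
    intro hinf
    exact h ((pv_greedy_pos_iff c s.toList).mpr hinf)

lemma pv_loop_eq (s : String) (d : PySem.Dict Char Int) :
    ∀ (l : List (String × Char)) (m : Int),
    (∀ p ∈ l, (PySem.Str.count s p.1 : Int) = d.getD p.2 0 ∧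
      (PySem.Str.isIn p.1 s = true ↔ 0 < d.getD p.2 0)) →
    pvALoop s (l.map (·.1)) m = pvBLoop d (l.map (·.2)) m := by
  intro l
  induction l with
  | nil => intro m _; simp [pvALoop, pvBLoop]
  | cons p rest ih =>
    intro m hl
    obtain ⟨hcnt, hin⟩ := hl p (by simp)
    have hrest : ∀ q ∈ rest, (PySem.Str.count s q.1 : Int) = d.getD q.2 0 ∧ (PySem.Str.isIn q.1 s = true ↔ 0 < d.getD q.2 0) := fun q hq => hl q (List.mem_cons_of_mem _ hq)
    simp only [List.map_cons, pvALoop, pvBLoop]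
    by_cases hb : PySem.Str.isIn p.1 s = true
    · rw [if_pos hb, if_pos (hin.mp hb), hcnt]
      by_cases hm : m + d.getD p.2 0 > 1
      · rw [if_pos hm, if_pos hm]
      · rw [if_neg hm, if_neg hm]
        exact ih _ hrest
    · rw [if_neg hb]
      have : ¬ d.getD p.2 0 > 0 := fun h => hb (hin.mpr h)
      rw [if_neg this]
      exact ih _ hrest

lemma pv_main (s : String) : checkDna s = checkDna_alt s := by
  unfold checkDna checkDna_alt
  have key := pv_loop_eq s (pvBFlush (s.toList.foldl pvBStep (PySem.Dict.empty, none, 0)))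
    [("AAAA", 'A'), ("CCCC", 'C'), ("GGGG", 'G'), ("TTTT", 'T')] 0
  simp only [List.map_cons, List.map_nil] at key
  apply key
  intro p hp
  have main : ∀ (c : Char) (sub : String), sub.toList = [c,c,c,c] →
      ((PySem.Str.count s sub : Int) = (pvBFlush (s.toList.foldl pvBStep (PySem.Dict.empty, none, 0))).getD c 0 ∧
       (PySem.Str.isIn sub s = true ↔ 0 < (pvBFlush (s.toList.foldl pvBStep (PySem.Dict.empty, none, 0))).getD c 0)) := by
    intro c sub hsub
    rw [pv_alt_getD c s.toList, pv_str_count c s sub hsub, pv_str_isIn c s sub hsub]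
    constructor
    · rfl
    · simp
  simp only [List.mem_cons, List.not_mem_nil, or_false] at hp
  rcases hp with h | h | h | h <;> subst h
  · exact main 'A' "AAAA" (by decide)
  · exact main 'C' "CCCC" (by decide)
  · exact main 'G' "GGGG" (by decide)
  · exact main 'T' "TTTT" (by decide)

-- ===== VERDICT (by name: the statement is the Claim_ definition above) =====
theorem checkDna_spec : Claim_equal_checkDna := by
  intro dnaStrip _
  unfold Spec_checkDna
  exact pv_main dnaStrip
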